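-- pv_equiv track=rewrite | github.com/Yonava/leetcode | Medium/1498/abhijit.py | numSubseq
-- ===== SOURCE A (Python) =====
-- from typing import List
--
-- def numSubseq(nums: List[int], target: int) -> int:
--     """
--     The number of subsequence with a sorted array and not sorted array would be the same.
--     This is because we only care about the minimum and the maximum value.
--     """
--     nums.sort()
--     res = 0
--     mod = (10 ** 9 + 7)
--     r = len(nums) - 1
--     for i, left in enumerate(nums):
--         while (left + nums[r]) > target and i <= r:
--             r -= 1
--
--         if i <= r:
--             res += 1 << ( r - i)
--
--     return res % mod
-- ===== SOURCE B (Python) =====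
-- def numSubseq(nums, target):
--     MOD = 10 ** 9 + 7
--     s = sorted(nums)
--     n = len(s)
--     pow2 = [pow(2, k, MOD) for k in range(n)]
--     res = 0
--     for j in range(n):
--         # c = number of indices i in [0, j] with s[i] + s[j] <= target,
--         # found by binary search on the sorted prefix s[0..j]
--         t = target - s[j]
--         lo, hi = 0, j + 1
--         while lo < hi:
--             mid = (lo + hi) // 2
--             if s[mid] <= t:
--                 lo = mid + 1
--             else:
--                 hi = mid
--         c = lo
--         # subsequences whose maximum element sits at index j:
--         # pick a valid minimum index i < c, anything in between is free
--         if c == j + 1: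
--             res = (res + pow2[j]) % MOD
--         elif c > 0:
--             res = (res + pow2[j] - pow2[j - c]) % MOD
--     return res
-- ===== Notes on version B (the rewrite author's own statement) =====
-- stated objective: alternative
-- what changed: A sweeps over minima with a shared shrinking right pointer and adds exact bignum shifts 1<<(r-i) with one final mod; B instead groups subsequences by the index j of their maximum, finds c = #{i <= j : s[i]+s[j] <= target} by a hand-written binary search on the sorted prefix, and adds the inclusion-exclusion closed form 2^j - 2^(j-c) (2^j when c = j+1) from a precomputed table of powers of 2 mod 1e9+7, reducing mod p each step; B also does not mutate its argument (A sorts nums in place).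
import Mathlib
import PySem

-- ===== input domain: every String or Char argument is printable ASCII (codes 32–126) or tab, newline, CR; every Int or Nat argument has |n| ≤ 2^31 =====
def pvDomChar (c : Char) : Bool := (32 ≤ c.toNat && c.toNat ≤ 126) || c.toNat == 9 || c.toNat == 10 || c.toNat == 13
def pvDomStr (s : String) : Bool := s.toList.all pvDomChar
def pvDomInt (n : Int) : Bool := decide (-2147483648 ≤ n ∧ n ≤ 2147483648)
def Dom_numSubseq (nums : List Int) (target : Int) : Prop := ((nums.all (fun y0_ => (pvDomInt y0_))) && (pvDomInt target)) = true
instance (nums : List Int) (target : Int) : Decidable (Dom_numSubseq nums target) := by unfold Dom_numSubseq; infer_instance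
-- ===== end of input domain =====

-- B replaces A's sweep over minima with a shared shrinking right pointer (and exact bignum
-- shifts 1 << (r-i), one final mod) by a per-maximum count: for each index j of the sorted
-- array a hand-written binary search finds c = #{i ≤ j : s[i]+s[j] ≤ target} and adds the
-- closed form 2^j - 2^(j-c) (2^j when c = j+1) from a table of powers of 2 mod 1e9+7,
-- reducing mod p each step. Equivalence is about the
-- RETURN value only: A sorts `nums` in place, B leaves its argument unchanged.

-- ===== PORT A =====
-- inner `while (left + nums[r]) > target and i <= r: r -= 1`; the Nat argument is fuel
-- (the caller passes (r + 1 - i).toNat, enough for the at most r + 1 - i decrements, so the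
-- fuel guard never cuts the loop short). nums[r] is read with `pyGetD … 0`, exact here: the
-- default 0 is only produced for the empty list, on which this loop body is never reached
-- (Python's negative r = -1 read hits the `i <= r` exit, conjunction unevaluated further).
def pvShrink (s : List Int) (target left i : Int) : Nat → Int → Int
  | 0, r => r
  | k + 1, r =>
      if left + PySem.List.pyGetD s r 0 > target ∧ i ≤ r then
        pvShrink s target left i k (r - 1)
      else r

-- `for i, left in enumerate(nums): …` — loop over the (sorted) list carrying i, r, res
def pvAIter (s : List Int) (target : Int) : List Int → Int → Int → Int → Int
  | [], _i, _r, res => res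
  | left :: rest, i, r, res =>
      let r' := pvShrink s target left i (r + 1 - i).toNat r
      pvAIter s target rest (i + 1) r' (if i ≤ r' then res + 2 ^ (r' - i).toNat else res)

def numSubseq (nums : List Int) (target : Int) : Int :=
  let s := PySem.List.sorted nums (fun x => x) false
  pvAIter s target s 0 ((s.length : Int) - 1) 0 % (10 ^ 9 + 7)

-- ===== PORT B =====
-- pow2 = [pow(2, k, MOD) for k in range(n)]
def pvPow2 (n : Nat) : List Int :=
  (List.range n).map (fun k => PySem.Int.powMod 2 k (10 ^ 9 + 7))

-- `while lo < hi:` — the Nat argument is fuel (the caller passes (j+1).toNat = hi - lo,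
-- enough since hi - lo strictly shrinks each iteration); s[mid] is always in range here
def pvBS (s : List Int) (t : Int) : Nat → Int → Int → Int
  | 0, lo, _hi => lo
  | k + 1, lo, hi =>
      if lo < hi then
        let mid := PySem.Int.floordiv (lo + hi) 2
        if PySem.List.pyGetD s mid 0 ≤ t then pvBS s t k (mid + 1) hi
        else pvBS s t k lo mid
      else lo

-- one iteration of `for j in range(n)`: binary search c, then the closed-form contribution
def pvBRow (s : List Int) (target : Int) (pow2 : List Int) (res j : Int) : Int :=
  let t := target - PySem.List.pyGetD s j 0
  let c := pvBS s t (j + 1).toNat 0 (j + 1)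
  if c = j + 1 then
    PySem.Int.mod (res + PySem.List.pyGetD pow2 j 0) (10 ^ 9 + 7)
  else if 0 < c then
    PySem.Int.mod (res + PySem.List.pyGetD pow2 j 0 - PySem.List.pyGetD pow2 (j - c) 0) (10 ^ 9 + 7)
  else res

def numSubseq_alt (nums : List Int) (target : Int) : Int :=
  let s := PySem.List.sorted nums (fun x => x) false
  (PySem.List.pyRange 0 (s.length : Int) 1).foldl (pvBRow s target (pvPow2 s.length)) 0

-- ===== PRECONDITION & SPEC =====
def Spec_numSubseq (nums : List Int) (target : Int) (out : Int) : Prop := out = numSubseq_alt nums target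
instance (nums : List Int) (target : Int) (out : Int) : Decidable (Spec_numSubseq nums target out) := by unfold Spec_numSubseq; infer_instance

-- ===== CLAIM (what is proved, stated in full; the proofs are below) =====
def Claim_equal_numSubseq : Prop := ∀ (nums : List Int) (target : Int), Dom_numSubseq nums target → Spec_numSubseq nums target (numSubseq nums target)

-- ===== LEMMAS AND PROOFS =====

-- element at Nat index (default 0; only read in range below)
def pvG (s : List Int) (i : Nat) : Int := s.getD i 0

-- number of elements ≤ t (a prefix, once s is sorted)
def pvCnt (s : List Int) (t : Int) : Nat :=
  ((Finset.range s.length).filter (fun k => pvG s k ≤ t)).card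

-- the pair (i, j) is valid: s[i] + s[j] ≤ target
abbrev pvOk (s : List Int) (target : Int) (i j : Nat) : Prop := pvG s i + pvG s j ≤ target

-- weight of the pair (min index i, max index j): # subsequences with exactly these extremes
def pvW (i j : Nat) : Int := if i = j then 1 else 2 ^ (j - i - 1)

def pvF (s : List Int) (target : Int) (i j : Nat) : Int :=
  if i ≤ j ∧ pvOk s target i j then pvW i j else 0

-- A's exact (un-modded) contribution of minimum index i
def pvTA (s : List Int) (target : Int) (i : Nat) : Int :=
  if pvOk s target i i then 2 ^ (pvCnt s (target - pvG s i) - 1 - i) else 0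

-- B's exact (un-modded) contribution of maximum index j
def pvTB (s : List Int) (target : Int) (j : Nat) : Int :=
  if min (pvCnt s (target - pvG s j)) (j + 1) = j + 1 then 2 ^ j
  else if 0 < min (pvCnt s (target - pvG s j)) (j + 1) then
    2 ^ j - 2 ^ (j - min (pvCnt s (target - pvG s j)) (j + 1))
  else 0

-- monotone access on a sorted list
lemma pvG_mono (s : List Int) (hs : s.Pairwise (· ≤ ·)) {i j : Nat}
    (hij : i ≤ j) (hj : j < s.length) : pvG s i ≤ pvG s j := by
  rcases eq_or_lt_of_le hij with rfl | h
  · exact le_refl _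
  · have := (List.pairwise_iff_getElem).1 hs i j (lt_trans h hj) hj h
    simpa [pvG, List.getD_eq_getElem?_getD, List.getElem?_eq_getElem, lt_trans h hj, hj] using this

-- prefix characterisation of pvCnt on a sorted list
lemma pvCnt_prefix (s : List Int) (hs : s.Pairwise (· ≤ ·)) (t : Int) {k : Nat}
    (hk : k < s.length) : pvG s k ≤ t ↔ k < pvCnt s t := by
  constructor
  · intro h
    have hsub : Finset.range (k + 1) ⊆ (Finset.range s.length).filter (fun k' => pvG s k' ≤ t) := by
      intro x hx
      have hx' : x < k + 1 := Finset.mem_range.1 hx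
      exact Finset.mem_filter.2 ⟨Finset.mem_range.2 (by omega),
        le_trans (pvG_mono s hs (by omega) hk) h⟩
    have h2 := Finset.card_le_card hsub
    rw [Finset.card_range] at h2
    unfold pvCnt
    omega
  · intro h
    by_contra hgt
    have hsub : (Finset.range s.length).filter (fun k' => pvG s k' ≤ t) ⊆ Finset.range k := by
      intro x hx
      rcases Finset.mem_filter.1 hx with ⟨hx1, hx2⟩
      rw [Finset.mem_range] at hx1 ⊢
      by_contra hxk
      push_neg at hxk
      exact hgt (le_trans (pvG_mono s hs hxk hx1) hx2)
    have h2 := Finset.card_le_card hsub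
    rw [Finset.card_range] at h2
    unfold pvCnt at h
    omega

lemma pvCnt_le_length (s : List Int) (t : Int) : pvCnt s t ≤ s.length := by
  simpa [pvCnt] using Finset.card_filter_le (Finset.range s.length) (fun k => pvG s k ≤ t)

-- pvOk in terms of pvCnt (valid partners of i form a prefix)
lemma pvOk_iff_lt_cnt (s : List Int) (hs : s.Pairwise (· ≤ ·)) (target : Int) {i j : Nat}
    (hj : j < s.length) : pvOk s target i j ↔ j < pvCnt s (target - pvG s i) := by
  rw [← pvCnt_prefix s hs _ hj]; unfold pvOk; omega

-- ∑_{k<m} 2^k = 2^m - 1 over ℤ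
lemma pv_geom (m : Nat) : (∑ k ∈ Finset.range m, (2:Int) ^ k) = 2 ^ m - 1 := by
  induction m with
  | zero => simp
  | succ m ih => rw [Finset.sum_range_succ, ih]; ring


-- pyGetD at an in-range nonnegative index is pvG
lemma pvG_pyGetD (s : List Int) (i : Int) (h0 : 0 ≤ i) (h1 : i < (s.length : Int)) :
    PySem.List.pyGetD s i 0 = pvG s i.toNat := by
  rw [PySem.List.pyGetD_eq_getElem s 0 h0 h1]
  rw [pvG, List.getD_eq_getElem]

-- casts: a % m with modulus 10^9+7
lemma pv_mod_add (S x p : Int) (_hp : 0 < p) :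
    (S % p + x % p) % p = (S + x) % p := by
  conv_rhs => rw [Int.add_emod]

lemma pv_mod_add_sub (S x y p : Int) (_hp : 0 < p) :
    (S % p + x % p - y % p) % p = (S + x - y) % p := by
  conv_rhs => rw [Int.sub_emod, Int.add_emod]
  rw [Int.sub_emod, Int.emod_emod_of_dvd _ dvd_rfl]

-- ===== A-side characterisation =====

lemma pvShrink_stop (s : List Int) (target left i : Int) (k : Nat) (r : Int)
    (h : ¬ (left + PySem.List.pyGetD s r 0 > target ∧ i ≤ r)) :
    pvShrink s target left i k r = r := by
  cases k with
  | zero => rfl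
  | succ k => simp [pvShrink, h]

lemma pvAIter_noop (s : List Int) (target : Int) :
    ∀ (rest : List Int) (i r res : Int), r < i →
      pvAIter s target rest i r res = res := by
  intro rest
  induction rest with
  | nil => intro i r res _; rfl
  | cons a rest ih =>
      intro i r res hri
      have hs : pvShrink s target a i (r + 1 - i).toNat r = r :=
        pvShrink_stop s target a i _ r (by omega)
      simp only [pvAIter, hs, if_neg (show ¬ i ≤ r from by omega)]
      exact ih (i + 1) r res (by omega)

-- the inner while lands exactly on max (cnt - 1) (l - 1)
lemma pvShrink_char (s : List Int) (target : Int) (hs : s.Pairwise (· ≤ ·)) (l : Nat)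
    (hl : l < s.length) :
    ∀ (k : Nat) (r : Int), max ((pvCnt s (target - pvG s l) : Int) - 1) ((l : Int) - 1) ≤ r →
      r ≤ (s.length : Int) - 1 → ((r - max ((pvCnt s (target - pvG s l) : Int) - 1) ((l : Int) - 1)).toNat ≤ k) →
      pvShrink s target (pvG s l) (l : Int) k r
        = max ((pvCnt s (target - pvG s l) : Int) - 1) ((l : Int) - 1) := by
  intro k
  induction k with
  | zero =>
      intro r h1 h2 h3
      have : r = max ((pvCnt s (target - pvG s l) : Int) - 1) ((l : Int) - 1) := by omega
      simpa [pvShrink] using this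
  | succ k ih =>
      intro r h1 h2 h3
      set E : Nat := pvCnt s (target - pvG s l) with hE
      set M : Int := max ((E : Int) - 1) ((l : Int) - 1) with hM
      have hEn : E ≤ s.length := pvCnt_le_length s _
      by_cases hrM : r = M
      · subst hrM
        have hcond : ¬ (pvG s l + PySem.List.pyGetD s M 0 > target ∧ (l : Int) ≤ M) := by
          by_cases hlM : (l : Int) ≤ M
          · have hMe : M = (E : Int) - 1 := by omega
            have h0M : 0 ≤ M := by omega
            have hMn : M < (s.length : Int) := by omega
            rw [pvG_pyGetD s M h0M hMn]
            have htoE : M.toNat < E := by omega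
            have := (pvCnt_prefix s hs (target - pvG s l) (k := M.toNat) (by omega)).2 (by omega)
            intro hc
            rcases hc with ⟨hc1, _⟩
            omega
          · intro hc; exact hlM hc.2
        rw [pvShrink, if_neg hcond]
      · have hMr : M < r := by omega
        have hlr : (l : Int) ≤ r := by omega
        have h0r : 0 ≤ r := by omega
        have hrn : r < (s.length : Int) := by omega
        have hjE : E ≤ r.toNat := by omega
        have hnot : ¬ pvG s r.toNat ≤ target - pvG s l := by
          intro hle
          have := (pvCnt_prefix s hs (target - pvG s l) (k := r.toNat) (by omega)).1 hle
          omega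
        have hcond : pvG s l + PySem.List.pyGetD s r 0 > target ∧ (l : Int) ≤ r := by
          rw [pvG_pyGetD s r h0r hrn]
          exact ⟨by omega, hlr⟩
        rw [pvShrink, if_pos hcond]
        exact ih (r - 1) (by omega) (by omega) (by omega)


-- A's loop from index l computes the exact per-minimum sum
lemma pvA_sum (s : List Int) (target : Int) (hs : s.Pairwise (· ≤ ·)) :
    ∀ (m l : Nat) (r res : Int), s.length - l ≤ m → l ≤ s.length →
      (l : Int) - 1 ≤ r → r ≤ (s.length : Int) - 1 →
      (∀ j : Nat, j < s.length → r < (j : Int) → ¬ pvOk s target l j) →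
      pvAIter s target (s.drop l) (l : Int) r res
        = res + ∑ i ∈ Finset.Ico l s.length, pvTA s target i := by
  intro m
  induction m with
  | zero =>
      intro l r res hm hl _ _ _
      have hln : l = s.length := by omega
      subst hln
      rw [List.drop_of_length_le (le_refl _)]
      simp [pvAIter]
  | succ m ih =>
      intro l r res hm hl hr1 hr2 H2
      by_cases hln : l < s.length
      · have hdrop : s.drop l = s[l] :: s.drop (l + 1) := List.drop_eq_getElem_cons hln
        have ha : s[l] = pvG s l := by rw [pvG, List.getD_eq_getElem]
        set E : Nat := pvCnt s (target - pvG s l) with hE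
        set M : Int := max ((E : Int) - 1) ((l : Int) - 1) with hM
        have hEn : E ≤ s.length := pvCnt_le_length s _
        have hMr : M ≤ r := by
          by_contra hc
          push_neg at hc
          have hrE : r < (E : Int) - 1 := by omega
          have hj0 : 0 ≤ r + 1 := by omega
          set j : Nat := (r + 1).toNat with hj
          have hjc : (j : Int) = r + 1 := by omega
          have hjE : j < E := by omega
          have hjn : j < s.length := by omega
          have hok : pvOk s target l j := by
            have := (pvCnt_prefix s hs (target - pvG s l) (k := j) hjn).2 hjE
            unfold pvOk; omega
          exact H2 j hjn (by omega) hok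
        have hsh : pvShrink s target s[l] (l : Int) (r + 1 - (l : Int)).toNat r = M := by
          rw [ha]
          exact pvShrink_char s target hs l hln _ r hMr hr2 (by omega)
        rw [hdrop]
        simp only [pvAIter, hsh]
        by_cases hlM : (l : Int) ≤ M
        · have hME : M = (E : Int) - 1 := by omega
          have hlE : l < E := by omega
          have hokll : pvOk s target l l := by
            have := (pvCnt_prefix s hs (target - pvG s l) (k := l) hln).2 hlE
            unfold pvOk; omega
          have hexp : (M - (l : Int)).toNat = E - 1 - l := by omega
          have H2' : ∀ j : Nat, j < s.length → M < (j : Int) → ¬ pvOk s target (l + 1) j := by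
            intro j hjn hMj hok
            have hjE : E ≤ j := by omega
            have hnotj : ¬ pvG s j ≤ target - pvG s l := by
              intro hle
              have := (pvCnt_prefix s hs (target - pvG s l) (k := j) hjn).1 hle
              omega
            have hmono : pvG s l ≤ pvG s (l + 1) := pvG_mono s hs (by omega) (by omega)
            unfold pvOk at hok
            omega
          have hrec := ih (l + 1) M (res + 2 ^ (M - (l : Int)).toNat)
            (by omega) (by omega) (by push_cast; omega) (by omega) H2'
          rw [if_pos hlM]
          rw [show ((l : Int) + 1) = ((l + 1 : Nat) : Int) from by push_cast; ring]
          rw [hrec, hexp]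
          rw [Finset.sum_eq_sum_Ico_succ_bot hln]
          have hTA : pvTA s target l = 2 ^ (E - 1 - l) := by
            rw [pvTA, if_pos hokll]
          rw [hTA]
          ring
        · have hMl : M = (l : Int) - 1 := by omega
          rw [if_neg hlM]
          rw [pvAIter_noop s target _ _ _ _ (by omega)]
          have hnotll : ¬ pvOk s target l l := by
            intro hok
            have hlE : l < E := by
              have := (pvCnt_prefix s hs (target - pvG s l) (k := l) hln).1 (by unfold pvOk at hok; omega)
              omega
            omega
          have hz : ∀ i ∈ Finset.Ico l s.length, pvTA s target i = 0 := by
            intro i hi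
            rcases Finset.mem_Ico.1 hi with ⟨hli, hin⟩
            rw [pvTA, if_neg]
            intro hok
            have hmono : pvG s l ≤ pvG s i := pvG_mono s hs hli hin
            unfold pvOk at hok hnotll
            omega
          rw [Finset.sum_eq_zero hz]
          ring
      · have hln' : l = s.length := by omega
        subst hln'
        rw [List.drop_of_length_le (le_refl _)]
        simp [pvAIter]


-- ===== B-side characterisation =====

lemma pvPow2_get (n : Nat) (d : Int) (h0 : 0 ≤ d) (h1 : d < (n : Int)) :
    PySem.List.pyGetD (pvPow2 n) d 0 = (2 : Int) ^ d.toNat % (10 ^ 9 + 7) := by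
  rw [PySem.List.pyGetD_eq_getElem (pvPow2 n) 0 h0
        (by simp only [pvPow2, List.length_map, List.length_range]; exact_mod_cast h1)]
  simp only [pvPow2, List.getElem_map, List.getElem_range, PySem.Int.powMod,
    PySem.Int.mod_eq_emod_of_pos (by norm_num : (0 : Int) < 10 ^ 9 + 7)]

-- the binary search computes min (cnt t) (j + 1)
lemma pvBS_char (s : List Int) (t : Int) (hs : s.Pairwise (· ≤ ·)) (j : Nat)
    (hj : j < s.length) :
    ∀ (k : Nat) (lo hi : Int), 0 ≤ lo → lo ≤ hi → hi ≤ (j : Int) + 1 → (hi - lo).toNat ≤ k →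
      (∀ i : Nat, (i : Int) < lo → pvG s i ≤ t) →
      (∀ i : Nat, hi ≤ (i : Int) → i ≤ j → ¬ pvG s i ≤ t) →
      pvBS s t k lo hi = ((min (pvCnt s t) (j + 1) : Nat) : Int) := by
  intro k
  induction k with
  | zero =>
      intro lo hi h0 hlh hhi hk inv1 inv2
      have hEn : pvCnt s t ≤ s.length := pvCnt_le_length s t
      have hm1 : min (pvCnt s t) (j + 1) ≤ pvCnt s t := min_le_left _ _
      have hm2 : min (pvCnt s t) (j + 1) ≤ j + 1 := min_le_right _ _
      have hcl : lo ≤ ((min (pvCnt s t) (j + 1) : Nat) : Int) := by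
        by_contra hc
        push_neg at hc
        have hcj : min (pvCnt s t) (j + 1) < j + 1 := by omega
        have hcc : min (pvCnt s t) (j + 1) = pvCnt s t := by omega
        have h1 := inv1 (min (pvCnt s t) (j + 1)) (by omega)
        have := (pvCnt_prefix s hs t (k := min (pvCnt s t) (j + 1)) (by omega)).1 h1
        omega
      have hch : ((min (pvCnt s t) (j + 1) : Nat) : Int) ≤ hi := by
        by_contra hc
        push_neg at hc
        have h0h : 0 ≤ hi := by omega
        have hic : ((hi.toNat : Nat) : Int) = hi := by omega
        have h2 := inv2 hi.toNat (by omega) (by omega)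
        have hin : hi.toNat < s.length := by omega
        have := (pvCnt_prefix s hs t (k := hi.toNat) hin).2 (by omega)
        exact h2 this
      have : lo = hi := by omega
      simp only [pvBS]
      omega
  | succ k ih =>
      intro lo hi h0 hlh hhi hk inv1 inv2
      have hEn : pvCnt s t ≤ s.length := pvCnt_le_length s t
      have hm1 : min (pvCnt s t) (j + 1) ≤ pvCnt s t := min_le_left _ _
      have hm2 : min (pvCnt s t) (j + 1) ≤ j + 1 := min_le_right _ _
      have hcl : lo ≤ ((min (pvCnt s t) (j + 1) : Nat) : Int) := by
        by_contra hc
        push_neg at hc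
        have hcj : min (pvCnt s t) (j + 1) < j + 1 := by omega
        have hcc : min (pvCnt s t) (j + 1) = pvCnt s t := by omega
        have h1 := inv1 (min (pvCnt s t) (j + 1)) (by omega)
        have := (pvCnt_prefix s hs t (k := min (pvCnt s t) (j + 1)) (by omega)).1 h1
        omega
      have hch : ((min (pvCnt s t) (j + 1) : Nat) : Int) ≤ hi := by
        by_contra hc
        push_neg at hc
        have h0h : 0 ≤ hi := by omega
        have hic : ((hi.toNat : Nat) : Int) = hi := by omega
        have h2 := inv2 hi.toNat (by omega) (by omega)
        have hin : hi.toNat < s.length := by omega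
        have := (pvCnt_prefix s hs t (k := hi.toNat) hin).2 (by omega)
        exact h2 this
      by_cases hlhi : lo < hi
      · have hmid := PySem.Int.floordiv_two_mid_bounds (le_of_lt hlhi)
        set mid : Int := PySem.Int.floordiv (lo + hi) 2 with hmiddef
        have hmidlt : mid < hi := by
          rw [hmiddef, PySem.Int.floordiv_lt_iff_lt_mul (by norm_num)]
          omega
        have h0m : 0 ≤ mid := by omega
        have hmn : mid < (s.length : Int) := by omega
        have hget : PySem.List.pyGetD s mid 0 = pvG s mid.toNat := pvG_pyGetD s mid h0m hmn
        simp only [pvBS, if_pos hlhi]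
        rw [hget]
        by_cases hle : pvG s mid.toNat ≤ t
        · rw [if_pos hle]
          refine ih (mid + 1) hi (by omega) (by omega) hhi (by omega) ?_ inv2
          intro i hi'
          have him : i ≤ mid.toNat := by omega
          exact le_trans (pvG_mono s hs him (by omega)) hle
        · rw [if_neg hle]
          refine ih lo mid h0 (by omega) (by omega) (by omega) inv1 ?_
          intro i hmi hij hgi
          have him : mid.toNat ≤ i := by omega
          exact hle (le_trans (pvG_mono s hs him (by omega)) hgi)
      · have : lo = hi := by omega
        simp only [pvBS, if_neg hlhi]
        omega

-- one row of B equals the exact row term, mod-reduced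
lemma pvBRow_step (s : List Int) (target : Int) (hs : s.Pairwise (· ≤ ·)) (l : Nat)
    (hl : l < s.length) (S : Int) :
    pvBRow s target (pvPow2 s.length) (S % (10 ^ 9 + 7)) (l : Int)
      = (S + pvTB s target l) % (10 ^ 9 + 7) := by
  have hp : (0 : Int) < 10 ^ 9 + 7 := by norm_num
  have hln : (l : Int) < (s.length : Int) := by exact_mod_cast hl
  have hEn : pvCnt s (target - pvG s l) ≤ s.length := pvCnt_le_length s _
  have hget : PySem.List.pyGetD s (l : Int) 0 = pvG s l := by
    rw [pvG_pyGetD s (l : Int) (by omega) hln]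
    simp
  have hbs : pvBS s (target - pvG s l) ((l : Int) + 1).toNat 0 ((l : Int) + 1)
      = ((min (pvCnt s (target - pvG s l)) (l + 1) : Nat) : Int) := by
    refine pvBS_char s (target - pvG s l) hs l hl _ 0 ((l : Int) + 1)
      (by omega) (by omega) (by omega) (by omega) ?_ ?_
    · intro i hi; exfalso; omega
    · intro i h1 h2; exfalso; omega
  set c : Nat := min (pvCnt s (target - pvG s l)) (l + 1) with hcdef
  simp only [pvBRow, hget, hbs, pvTB, ← hcdef]
  by_cases hc1 : c = l + 1
  · rw [if_pos (by exact_mod_cast congrArg (Nat.cast : Nat → Int) hc1), if_pos hc1]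
    rw [pvPow2_get s.length (l : Int) (by omega) hln]
    rw [PySem.Int.mod_eq_emod_of_pos hp]
    simp only [Int.toNat_natCast]
    rw [pv_mod_add _ _ _ hp]
  · rw [if_neg (by intro h; exact hc1 (by exact_mod_cast h)), if_neg hc1]
    by_cases hc0 : 0 < c
    · rw [if_pos (by exact_mod_cast hc0), if_pos hc0]
      have hcle : c ≤ l := by omega
      rw [pvPow2_get s.length (l : Int) (by omega) hln]
      rw [show ((l : Int) - (c : Int)) = ((l - c : Nat) : Int) from by push_cast [hcle]; ring]
      rw [pvPow2_get s.length ((l - c : Nat) : Int) (by omega) (by exact_mod_cast by omega)]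
      rw [PySem.Int.mod_eq_emod_of_pos hp]
      simp only [Int.toNat_natCast]
      rw [pv_mod_add_sub _ _ _ _ hp]
      ring_nf
    · rw [if_neg (by intro h; exact hc0 (by exact_mod_cast h)), if_neg hc0]
      ring_nf

-- B's fold from index l computes the mod-reduced per-maximum sum
lemma pvB_sum (s : List Int) (target : Int) (hs : s.Pairwise (· ≤ ·)) :
    ∀ (m l : Nat) (S : Int), s.length - l ≤ m → l ≤ s.length →
      (PySem.List.pyRange (l : Int) (s.length : Int) 1).foldl
          (pvBRow s target (pvPow2 s.length)) (S % (10 ^ 9 + 7))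
        = (S + ∑ j ∈ Finset.Ico l s.length, pvTB s target j) % (10 ^ 9 + 7) := by
  intro m
  induction m with
  | zero =>
      intro l S hm hl
      have hln : l = s.length := by omega
      subst hln
      rw [PySem.List.pyRange_one_eq_nil (by omega)]
      simp
  | succ m ih =>
      intro l S hm hl
      by_cases hln : l < s.length
      · rw [PySem.List.pyRange_one_cons (by exact_mod_cast hln)]
        simp only [List.foldl_cons]
        rw [pvBRow_step s target hs l hln S]
        rw [show ((l : Int) + 1) = ((l + 1 : Nat) : Int) from by push_cast; ring]
        rw [ih (l + 1) (S + pvTB s target l) (by omega) (by omega)]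
        rw [Finset.sum_eq_sum_Ico_succ_bot hln]
        ring_nf
      · have hln' : l = s.length := by omega
        subst hln'
        rw [PySem.List.pyRange_one_eq_nil (by omega)]
        simp


-- ===== double counting: per-minimum rows and per-maximum columns sum the same pairs =====

lemma pvRowA (s : List Int) (target : Int) (hs : s.Pairwise (· ≤ ·)) (i : Nat)
    (hi : i < s.length) :
    (∑ j ∈ Finset.range s.length, pvF s target i j) = pvTA s target i := by
  set E : Nat := pvCnt s (target - pvG s i) with hE
  have hEn : E ≤ s.length := pvCnt_le_length s _
  have hfilter : (Finset.range s.length).filter (fun j => i ≤ j ∧ pvOk s target i j)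
      = Finset.Ico i E := by
    ext j
    simp only [Finset.mem_filter, Finset.mem_range, Finset.mem_Ico]
    constructor
    · rintro ⟨hjn, hij, hok⟩
      exact ⟨hij, by rw [pvOk_iff_lt_cnt s hs target hjn] at hok; exact hok⟩
    · rintro ⟨hij, hjE⟩
      have hjn : j < s.length := by omega
      exact ⟨hjn, hij, (pvOk_iff_lt_cnt s hs target hjn).2 hjE⟩
  have hsum : (∑ j ∈ Finset.range s.length, pvF s target i j)
      = ∑ j ∈ Finset.Ico i E, pvW i j := by
    rw [← hfilter, Finset.sum_filter]
    exact Finset.sum_congr rfl (by intro j _; rw [pvF])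
  rw [hsum]
  by_cases hok : pvOk s target i i
  · have hiE : i < E := (pvOk_iff_lt_cnt s hs target hi).1 hok
    rw [Finset.sum_eq_sum_Ico_succ_bot hiE]
    have hii : pvW i i = 1 := by rw [pvW, if_pos rfl]
    have htail : (∑ j ∈ Finset.Ico (i + 1) E, pvW i j) = 2 ^ (E - 1 - i) - 1 := by
      rw [Finset.sum_Ico_eq_sum_range]
      have hcongr : ∀ k ∈ Finset.range (E - (i + 1)), pvW i (i + 1 + k) = (2 : Int) ^ k := by
        intro k _
        rw [pvW, if_neg (by omega)]
        congr 1
        omega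
      rw [Finset.sum_congr rfl hcongr, pv_geom]
      congr 2
      omega
    rw [hii, htail, pvTA, if_pos hok]
    ring
  · have hEi : E ≤ i := by
      by_contra hc
      push_neg at hc
      exact hok ((pvOk_iff_lt_cnt s hs target hi).2 hc)
    rw [Finset.Ico_eq_empty (by omega), Finset.sum_empty, pvTA, if_neg hok]


lemma pvRowB (s : List Int) (target : Int) (hs : s.Pairwise (· ≤ ·)) (j : Nat)
    (hj : j < s.length) :
    (∑ i ∈ Finset.range s.length, pvF s target i j) = pvTB s target j := by
  set E : Nat := pvCnt s (target - pvG s j) with hE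
  set c : Nat := min E (j + 1) with hc
  have hok_sym : ∀ i : Nat, pvOk s target i j ↔ pvOk s target j i := by
    intro i; unfold pvOk; omega
  have hfilter : (Finset.range s.length).filter (fun i => i ≤ j ∧ pvOk s target i j)
      = Finset.range c := by
    ext i
    simp only [Finset.mem_filter, Finset.mem_range]
    constructor
    · rintro ⟨hin, hij, hok⟩
      rw [hok_sym, pvOk_iff_lt_cnt s hs target hin] at hok
      omega
    · intro hic
      have hij : i ≤ j := by omega
      have hin : i < s.length := by omega
      refine ⟨hin, hij, ?_⟩
      rw [hok_sym, pvOk_iff_lt_cnt s hs target hin]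
      omega
  have hsum : (∑ i ∈ Finset.range s.length, pvF s target i j)
      = ∑ i ∈ Finset.range c, pvW i j := by
    rw [← hfilter, Finset.sum_filter]
    exact Finset.sum_congr rfl (by intro i _; rw [pvF])
  rw [hsum]
  by_cases hc1 : c = j + 1
  · rw [hc1, Finset.sum_range_succ]
    have hjj : pvW j j = 1 := by rw [pvW, if_pos rfl]
    have hhead : (∑ i ∈ Finset.range j, pvW i j) = 2 ^ j - 1 := by
      have hrefl := Finset.sum_range_reflect (fun k => (2 : Int) ^ k) j
      have hcongr : ∀ i ∈ Finset.range j, pvW i j = (2 : Int) ^ (j - 1 - i) := by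
        intro i hi
        rw [Finset.mem_range] at hi
        rw [pvW, if_neg (by omega)]
        congr 1
        omega
      rw [Finset.sum_congr rfl hcongr, hrefl, pv_geom]
    rw [hjj, hhead, pvTB, ← hc, if_pos hc1]
    ring
  · by_cases hc0 : 0 < c
    · have hcle : c ≤ j := by omega
      have hsum2 : (∑ i ∈ Finset.range c, pvW i j)
          = ∑ k ∈ Finset.range c, (2 : Int) ^ (j - c + k) := by
        have hrefl := Finset.sum_range_reflect (fun k => (2 : Int) ^ (j - c + k)) c
        have hcongr : ∀ i ∈ Finset.range c, pvW i j = (2 : Int) ^ (j - c + (c - 1 - i)) := by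
          intro i hi
          rw [Finset.mem_range] at hi
          rw [pvW, if_neg (by omega)]
          congr 1
          omega
        rw [Finset.sum_congr rfl hcongr, hrefl]
      have hsum3 : (∑ k ∈ Finset.range c, (2 : Int) ^ (j - c + k))
          = 2 ^ (j - c) * (2 ^ c - 1) := by
        have : ∀ k ∈ Finset.range c, (2 : Int) ^ (j - c + k) = 2 ^ (j - c) * 2 ^ k := by
          intro k _
          rw [pow_add]
        rw [Finset.sum_congr rfl this, ← Finset.mul_sum, pv_geom]
      rw [hsum2, hsum3, pvTB, ← hc, if_neg hc1, if_pos hc0]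
      have hpow : (2 : Int) ^ (j - c) * 2 ^ c = 2 ^ j := by
        rw [← pow_add]
        congr 1
        omega
      rw [mul_sub, hpow, mul_one]
    · have hc0' : c = 0 := by omega
      rw [hc0', Finset.range_zero, Finset.sum_empty, pvTB, ← hc, if_neg hc1, if_neg hc0]


lemma pv_exchange (s : List Int) (target : Int) (hs : s.Pairwise (· ≤ ·)) :
    (∑ i ∈ Finset.Ico 0 s.length, pvTA s target i)
      = ∑ j ∈ Finset.Ico 0 s.length, pvTB s target j := by
  rw [← Finset.range_eq_Ico]
  calc (∑ i ∈ Finset.range s.length, pvTA s target i)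
      = ∑ i ∈ Finset.range s.length, ∑ j ∈ Finset.range s.length, pvF s target i j :=
        Finset.sum_congr rfl
          (fun i hi => (pvRowA s target hs i (Finset.mem_range.1 hi)).symm)
    _ = ∑ j ∈ Finset.range s.length, ∑ i ∈ Finset.range s.length, pvF s target i j :=
        Finset.sum_comm
    _ = ∑ j ∈ Finset.range s.length, pvTB s target j :=
        Finset.sum_congr rfl
          (fun j hj => pvRowB s target hs j (Finset.mem_range.1 hj))

-- ===== VERDICT (by name: the statement is the Claim_ definition above) =====
theorem numSubseq_spec : Claim_equal_numSubseq := by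
  intro nums target _
  unfold Spec_numSubseq numSubseq numSubseq_alt
  simp only []
  set s := PySem.List.sorted nums (fun x => x) false with hs_def
  have hs : s.Pairwise (· ≤ ·) := by
    simpa using PySem.List.sorted_pairwise nums (fun x => x)
  have hA := pvA_sum s target hs s.length 0 ((s.length : Int) - 1) 0
    (by omega) (by omega) (by omega) (by omega)
    (by intro j hj hgt hok; exfalso; omega)
  simp only [Nat.cast_zero, List.drop_zero, zero_add] at hA
  have hB := pvB_sum s target hs s.length 0 0 (by omega) (by omega)
  simp only [Nat.cast_zero, zero_add] at hB
  rw [hA, pv_exchange s target hs]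
  rw [show ((0 : Int) % (10 ^ 9 + 7)) = 0 from rfl] at hB
  exact hB.symm
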